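-- pv_equiv track=rewrite | github.com/Inka-R/Intro-Game-Bagels- | bagels game.py | getClues
-- ===== SOURCE A (Python) =====
-- def getClues(guess, secretNum):
--     if guess == secretNum:
--         return 'You got it!'
--
--     clues = []
--
--     for i in range(len(guess)):
--         if guess[i] == secretNum[i]:
--             clues.append('Fermi ')
--         elif guess[i] in secretNum:
--             clues.append('Pico ')
--     if len(clues) == 0:
--         return 'Bagels'
--     else:
--         clues.sort()
--         return ''.join(clues)
-- ===== SOURCE B (Python) =====
-- def getClues(guess, secretNum):
--     if guess == secretNum:
--         return 'You got it!'
--     pairs = list(zip(guess, secretNum))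
--     fermi = sum(1 for g, s in pairs if g == s)
--     pico = sum(1 for g, s in pairs if g != s and g in secretNum)
--     return 'Fermi ' * fermi + 'Pico ' * pico or 'Bagels'
-- ===== Notes on version B (the rewrite author's own statement) =====
-- stated objective: simpler
-- what changed: B zips the two strings and takes two declarative 0/1 sums (exact matches, then misplaced-digit matches) instead of A's index loop that appends clue strings, sorts them and joins; the result is built directly as 'Fermi '*fermi + 'Pico '*pico (Fermi-first matches A's alphabetical sort), with 'or' yielding 'Bagels' for the empty string.
import Mathlib
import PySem

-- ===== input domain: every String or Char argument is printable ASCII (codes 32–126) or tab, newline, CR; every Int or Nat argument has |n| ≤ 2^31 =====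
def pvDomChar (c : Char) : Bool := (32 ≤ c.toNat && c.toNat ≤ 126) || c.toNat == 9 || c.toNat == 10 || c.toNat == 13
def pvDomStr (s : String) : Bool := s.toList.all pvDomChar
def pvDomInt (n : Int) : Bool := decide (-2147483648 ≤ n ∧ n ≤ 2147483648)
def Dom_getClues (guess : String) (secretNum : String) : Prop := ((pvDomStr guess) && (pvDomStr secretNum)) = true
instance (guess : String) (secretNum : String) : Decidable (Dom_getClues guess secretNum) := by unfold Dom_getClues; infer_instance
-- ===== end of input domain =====

-- B zips the two strings and takes two declarative 0/1 sums (exact matches, then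
-- misplaced matches), building the result directly as 'Fermi '*fermi + 'Pico '*pico
-- (Fermi before Pico matches A's alphabetical sort) — simpler: no clue list, no sort, no join.

-- ===== PORT A =====
-- loop body of A: append 'Fermi ' / 'Pico ' to the clue list (pyGetD is exact under Pre_)
def pvCluesStep (g s : List Char) (clues : List String) (i : Int) : List String :=
  if PySem.List.pyGetD g i ' ' = PySem.List.pyGetD s i ' ' then clues ++ ["Fermi "]
  else if PySem.Chars.isIn [PySem.List.pyGetD g i ' '] s then clues ++ ["Pico "]
  else clues

def getClues (guess : String) (secretNum : String) : String :=
  if guess = secretNum then "You got it!"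
  else
    let g := guess.toList
    let s := secretNum.toList
    let clues := (PySem.List.pyRange 0 (g.length : Int) 1).foldl (pvCluesStep g s) []
    if clues.length = 0 then "Bagels"
    else PySem.Str.join "" (PySem.List.sorted clues (fun x => x) false)

-- ===== PORT B =====
def getClues_alt (guess : String) (secretNum : String) : String :=
  if guess = secretNum then "You got it!"
  else
    let pairs := guess.toList.zip secretNum.toList
    let fermi : Int := (pairs.map (fun p => if p.1 = p.2 then (1 : Int) else 0)).sum
    let pico : Int := (pairs.map (fun p =>
      if ¬ p.1 = p.2 ∧ PySem.Chars.isIn [p.1] secretNum.toList then (1 : Int) else 0)).sum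
    let r := PySem.List.pyRepeat "Fermi ".toList fermi ++ PySem.List.pyRepeat "Pico ".toList pico
    if r = [] then "Bagels" else String.ofList r

-- ===== PRECONDITION & SPEC =====
-- Pre_ excludes exactly the inputs where Python A raises IndexError:
-- guess ≠ secretNum and guess longer than secretNum (secretNum[i] out of range).
def Pre_getClues (guess : String) (secretNum : String) : Prop :=
  guess = secretNum ∨ guess.toList.length ≤ secretNum.toList.length
instance (guess : String) (secretNum : String) : Decidable (Pre_getClues guess secretNum) := by
  unfold Pre_getClues; infer_instance

def pvWitness_getClues : String × String := ("123", "321")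

def Spec_getClues (guess : String) (secretNum : String) (out : String) : Prop := out = getClues_alt guess secretNum
instance (guess : String) (secretNum : String) (out : String) : Decidable (Spec_getClues guess secretNum out) := by unfold Spec_getClues; infer_instance

-- ===== CLAIM (what is proved, stated in full; the proofs are below) =====
def Claim_equal_getClues : Prop := ∀ (guess : String) (secretNum : String), Dom_getClues guess secretNum → Pre_getClues guess secretNum → Spec_getClues guess secretNum (getClues guess secretNum)

-- ===== LEMMAS AND PROOFS =====

-- the per-index clue, as a (possibly empty) singleton list
def pvClueAt (g s : List Char) (i : Int) : List String :=
  if PySem.List.pyGetD g i ' ' = PySem.List.pyGetD s i ' ' then ["Fermi "]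
  else if PySem.Chars.isIn [PySem.List.pyGetD g i ' '] s then ["Pico "]
  else []

-- the per-pair clue, over zipped characters
def pvClueP (s : List Char) (p : Char × Char) : List String :=
  if p.1 = p.2 then ["Fermi "]
  else if PySem.Chars.isIn [p.1] s then ["Pico "]
  else []

theorem pvStepAppend (g s : List Char) (acc : List String) (i : Int) :
    pvCluesStep g s acc i = acc ++ pvClueAt g s i := by
  unfold pvCluesStep pvClueAt
  split_ifs <;> simp

-- A's clue list is the flatMap of the per-index clues
theorem pvCluesFlat (g s : List Char) :
    (PySem.List.pyRange 0 (g.length : Int) 1).foldl (pvCluesStep g s) []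
      = ((PySem.List.pyRange 0 (g.length : Int) 1).map (pvClueAt g s)).flatten := by
  have h : pvCluesStep g s = fun acc i => acc ++ pvClueAt g s i := by
    funext acc i; exact pvStepAppend g s acc i
  rw [h, PySem.List.foldl_append_eq_flatMap, List.flatMap_def]
  rfl

-- re-index: the per-index clues over range(len g) are the per-pair clues over zip g s
theorem pvRangeToZip (g s : List Char) (h : g.length ≤ s.length) :
    (PySem.List.pyRange 0 (g.length : Int) 1).map (pvClueAt g s)
      = (g.zip s).map (pvClueP s) := by
  apply List.ext_getElem
  · simp [PySem.List.length_pyRange_one, Nat.min_eq_left h]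
  · intro k h1 h2
    simp only [List.getElem_map]
    have hk : k < g.length := by
      simpa [PySem.List.length_pyRange_one] using h1
    have hrange : (PySem.List.pyRange 0 (g.length : Int) 1)[k]'(by
        simpa [PySem.List.length_pyRange_one] using hk) = (k : Int) := by
      rw [PySem.List.getElem_pyRange_one]; ring
    rw [hrange]
    have hks : k < s.length := lt_of_lt_of_le hk h
    unfold pvClueAt pvClueP
    simp [PySem.List.pyGetD_natCast, hk, hks,
      List.getElem_zip]

-- every clue is 'Fermi ' or 'Pico '
theorem pvMemFlat (s : List Char) (l : List (Char × Char)) :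
    ∀ x ∈ (l.map (pvClueP s)).flatten, x = "Fermi " ∨ x = "Pico " := by
  intro x hx
  rw [List.mem_flatten] at hx
  obtain ⟨l', hl', hx⟩ := hx
  rw [List.mem_map] at hl'
  obtain ⟨p, _, rfl⟩ := hl'
  unfold pvClueP at hx
  split_ifs at hx <;> simp at hx <;> simp [hx]

-- B's 0/1 Int sums count the 'Fermi ' / 'Pico ' occurrences in A's clue list
theorem pvSumFermi (s : List Char) (l : List (Char × Char)) :
    (l.map (fun p => if p.1 = p.2 then (1 : Int) else 0)).sum
      = ((l.map (pvClueP s)).flatten.count "Fermi " : Int) := by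
  induction l with
  | nil => simp
  | cons p l ih =>
    simp only [List.map_cons, List.flatten_cons, List.count_append, List.sum_cons]
    by_cases h1 : p.1 = p.2
    · rw [show pvClueP s p = ["Fermi "] from by simp [pvClueP, h1]]
      simp [h1, ih]
    · by_cases h2 : PySem.Chars.isIn [p.1] s
      · rw [show pvClueP s p = ["Pico "] from by simp [pvClueP, h1, h2]]
        simp [h1, ih]
      · rw [show pvClueP s p = [] from by simp [pvClueP, h1, h2]]
        simp [h1, ih]

theorem pvSumPico (s : List Char) (l : List (Char × Char)) :
    (l.map (fun p =>
        if ¬ p.1 = p.2 ∧ PySem.Chars.isIn [p.1] s then (1 : Int) else 0)).sum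
      = ((l.map (pvClueP s)).flatten.count "Pico " : Int) := by
  induction l with
  | nil => simp
  | cons p l ih =>
    simp only [List.map_cons, List.flatten_cons, List.count_append, List.sum_cons]
    by_cases h1 : p.1 = p.2
    · rw [show pvClueP s p = ["Fermi "] from by simp [pvClueP, h1]]
      simp [h1, ih]
    · by_cases h2 : PySem.Chars.isIn [p.1] s
      · rw [show pvClueP s p = ["Pico "] from by simp [pvClueP, h1, h2]]
        simp [h1, h2, ih]
      · rw [show pvClueP s p = [] from by simp [pvClueP, h1, h2]]
        simp [h1, h2, ih]

theorem pvJoinNil (ls : List (List Char)) : PySem.Chars.join [] ls = ls.flatten := by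
  induction ls with
  | nil => rfl
  | cons a t ih =>
    cases t with
    | nil => simp [PySem.Chars.join, List.intercalate]
    | cons b u =>
      simp [PySem.Chars.join, List.intercalate, List.intersperse] at ih ⊢
      simpa using ih

theorem pvFermiLtPico : ("Fermi " : String) < "Pico " := by
  rw [String.lt_iff_toList_lt]; decide

-- sorted clues = all the Fermis then all the Picos
theorem pvSortedShape (clues : List String)
    (h : ∀ x ∈ clues, x = "Fermi " ∨ x = "Pico ") :
    PySem.List.sorted clues (fun x => x) false
      = List.replicate (clues.count "Fermi ") "Fermi "
        ++ List.replicate (clues.count "Pico ") "Pico " := by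
  apply PySem.List.sorted_id_eq_of_perm_of_pairwise
  · rw [List.perm_iff_count]
    intro a
    by_cases ha : a = "Fermi "
    · subst ha; simp [List.count_append, List.count_replicate]
    · by_cases hb : a = "Pico "
      · subst hb; simp [List.count_append, List.count_replicate]
      · have : List.count a clues = 0 := by
          rw [List.count_eq_zero]
          intro hmem
          rcases h a hmem with rfl | rfl
          · exact ha rfl
          · exact hb rfl
        rw [List.count_append, List.count_replicate, List.count_replicate]
        simp [this, (by simpa [eq_comm] using ha : ¬ ("Fermi " : String) = a),
              (by simpa [eq_comm] using hb : ¬ ("Pico " : String) = a)]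
  · rw [List.pairwise_append]
    refine ⟨?_, ?_, ?_⟩
    · rw [List.pairwise_replicate]; right; exact le_refl _
    · rw [List.pairwise_replicate]; right; exact le_refl _
    · intro a ha b hb
      rw [List.eq_of_mem_replicate ha, List.eq_of_mem_replicate hb]
      exact le_of_lt pvFermiLtPico

-- ''.join of the sorted clue list is the pair of repetitions B builds
theorem pvJoinShape (f p : Nat) :
    PySem.Str.join "" (List.replicate f ("Fermi " : String) ++ List.replicate p "Pico ")
      = String.ofList (PySem.List.pyRepeat "Fermi ".toList (f : Int) ++
                   PySem.List.pyRepeat "Pico ".toList (p : Int)) := by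
  rw [← String.toList_inj, PySem.Str.toList_join]
  have : ("" : String).toList = [] := rfl
  rw [this, pvJoinNil]
  simp [PySem.List.pyRepeat, List.map_replicate, List.flatten_append, String.toList_ofList]

-- B's concatenation is empty exactly when both counts are zero
theorem pvRepEmpty (f p : Nat) :
    (PySem.List.pyRepeat "Fermi ".toList (f : Int) ++
      PySem.List.pyRepeat "Pico ".toList (p : Int) = []) ↔ (f = 0 ∧ p = 0) := by
  rw [← List.length_eq_zero_iff]
  simp [PySem.List.pyRepeat, List.length_flatten, List.map_replicate, List.sum_replicate]

theorem pvCountZero (clues : List String)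
    (h : ∀ x ∈ clues, x = "Fermi " ∨ x = "Pico ") :
    (clues.count "Fermi " = 0 ∧ clues.count "Pico " = 0) ↔ clues = [] := by
  constructor
  · rintro ⟨hf, hp⟩
    rcases List.eq_nil_or_concat clues with rfl | ⟨l, x, rfl⟩
    · rfl
    · exfalso
      rcases h x (by simp) with rfl | rfl
      · simp [List.count_append] at hf
      · simp [List.count_append] at hp
  · rintro rfl; simp

-- ===== VERDICT (by name: the statement is the Claim_ definition above) =====
theorem getClues_spec : Claim_equal_getClues := by
  intro guess secretNum _ hpre
  unfold Spec_getClues getClues getClues_alt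
  by_cases heq : guess = secretNum
  · simp [heq]
  · simp only [heq, if_false]
    have hlen : guess.toList.length ≤ secretNum.toList.length := by
      rcases hpre with h | h
      · exact absurd h heq
      · exact h
    set g := guess.toList
    set s := secretNum.toList
    rw [pvCluesFlat g s, pvRangeToZip g s hlen]
    have hM := pvMemFlat s (g.zip s)
    set clues := ((g.zip s).map (pvClueP s)).flatten with hclues
    rw [pvSumFermi s, pvSumPico s]
    by_cases hnil : clues = []
    · rw [if_pos (by simp [hnil]), if_pos (by
        rw [pvRepEmpty]; exact (pvCountZero clues hM).mpr hnil)]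
    · rw [if_neg (by simpa [List.length_eq_zero_iff] using hnil),
        if_neg (by rw [pvRepEmpty]; exact fun hc => hnil ((pvCountZero clues hM).mp hc))]
      rw [pvSortedShape clues hM, pvJoinShape]
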